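-- pv_equiv track=rewrite | github.com/maeserichar/AdventOfCode2018 | day2/01_inventory_management_system.py | process
-- ===== SOURCE A (Python) =====
-- def process(line):
--   d = {}
--   for char in line:
--     d[char] = d.get(char, 0) + 1
--
--   two = 0
--   three = 0
--
--   for (k,v) in d.items():
--     if v == 2:
--       two = 1
--     if v == 3:
--       three = 1
--
--   return (two,three)
-- ===== SOURCE B (Python) =====
-- def process(line):
--     s = sorted(line)
--     two = 0
--     three = 0
--     prev = None
--     run = 0
--     for c in s:
--         if c == prev:
--             run += 1
--         else:
--             if run == 2:
--                 two = 1
--             if run == 3: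
--                 three = 1
--             prev = c
--             run = 1
--     if run == 2:
--         two = 1
--     if run == 3:
--         three = 1
--     return (two, three)
-- ===== Notes on version B (the rewrite author's own statement) =====
-- stated objective: alternative
-- what changed: Replaces the dict frequency count plus items scan with sort-then-run-length: one pass over the sorted characters tracking the current run, setting the flags when a run closes at length 2 or 3; no hash map at all.
import Mathlib
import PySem

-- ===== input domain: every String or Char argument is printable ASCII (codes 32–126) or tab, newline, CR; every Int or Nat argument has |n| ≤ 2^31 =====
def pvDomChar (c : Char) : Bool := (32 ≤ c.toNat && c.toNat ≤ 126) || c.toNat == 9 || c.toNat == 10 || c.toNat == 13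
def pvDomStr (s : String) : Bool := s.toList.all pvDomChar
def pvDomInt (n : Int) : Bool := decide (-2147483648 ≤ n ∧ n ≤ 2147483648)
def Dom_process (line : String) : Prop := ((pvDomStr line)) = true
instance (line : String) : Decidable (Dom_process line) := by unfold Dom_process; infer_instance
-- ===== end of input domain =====

-- B replaces A's dict frequency count with a sort-then-run-length scan (one pass over the
-- sorted characters); equivalence of the return values is proved for every string.

-- ===== PORT A =====
def process (line : String) : Int × Int :=
  let d := line.toList.foldl (fun d c => d.insert c (d.getD c 0 + 1))
    (PySem.Dict.empty : PySem.Dict Char Int)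
  d.items.foldl
    (fun (p : Int × Int) kv =>
      ((if kv.2 = 2 then 1 else p.1), (if kv.2 = 3 then 1 else p.2)))
    (0, 0)

-- ===== PORT B =====
-- one step of B's loop over the sorted characters; state = (two, three, prev, run)
def bstep (st : Int × Int × Option Char × Int) (c : Char) : Int × Int × Option Char × Int :=
  if some c = st.2.2.1 then (st.1, st.2.1, st.2.2.1, st.2.2.2 + 1)
  else ((if st.2.2.2 = 2 then 1 else st.1),
        (if st.2.2.2 = 3 then 1 else st.2.1), some c, 1)

-- the trailing flush after the loop
def bfinish (st : Int × Int × Option Char × Int) : Int × Int :=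
  ((if st.2.2.2 = 2 then 1 else st.1), (if st.2.2.2 = 3 then 1 else st.2.1))

def process_alt (line : String) : Int × Int :=
  bfinish ((PySem.List.sorted line.toList (fun x => x) false).foldl bstep (0, 0, none, 0))

-- ===== PRECONDITION & SPEC =====
def Spec_process (line : String) (out : Int × Int) : Prop := out = process_alt line
instance (line : String) (out : Int × Int) : Decidable (Spec_process line out) := by unfold Spec_process; infer_instance

-- ===== CLAIM (what is proved, stated in full; the proofs are below) =====
def Claim_equal_process : Prop := ∀ (line : String), Dom_process line → Spec_process line (process line)

-- ===== LEMMAS AND PROOFS =====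

-- flag update: setting on P after setting on Q is one test of Q ∨ P
lemma if_flush (P Q : Prop) [Decidable P] [Decidable Q] (v : Int) :
    (if P then (1 : Int) else if Q then 1 else v) = if Q ∨ P then 1 else v := by
  split_ifs <;> tauto

-- A's flag loop over the dict items sets each flag iff some count equals 2 (resp. 3).
lemma foldA (l : List (Char × Int)) (a b : Int) :
    l.foldl (fun (p : Int × Int) kv =>
        ((if kv.2 = 2 then 1 else p.1), (if kv.2 = 3 then 1 else p.2))) (a, b)
      = ((if ∃ kv ∈ l, kv.2 = 2 then 1 else a),
         (if ∃ kv ∈ l, kv.2 = 3 then 1 else b)) := by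
  induction l generalizing a b with
  | nil => simp
  | cons kv t ih =>
    simp only [List.foldl_cons, ih]
    congr 1 <;>
    · rw [if_flush]
      refine if_congr ?_ rfl rfl
      simp

-- characterisation of A's result: a flag is set iff some character occurs exactly 2 (resp. 3) times
lemma processA (line : String) :
    process line = ((if ∃ x ∈ line.toList, (line.toList.count x : Int) = 2 then 1 else 0),
                    (if ∃ x ∈ line.toList, (line.toList.count x : Int) = 3 then 1 else 0)) := by
  unfold process
  rw [PySem.Dict.foldl_insert_getD_add_one_eq_counter, foldA, PySem.Dict.items_counter]
  have h : ∀ k : Int, (∃ kv ∈ (PySem.Set.ofList line.toList).map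
        (fun c => (c, (line.toList.count c : Int))), kv.2 = k)
      ↔ (∃ x ∈ line.toList, (line.toList.count x : Int) = k) := by
    intro k
    constructor
    · rintro ⟨kv, hkv, hk⟩
      rcases List.mem_map.mp hkv with ⟨x, hx, rfl⟩
      exact ⟨x, (PySem.Set.mem_ofList _ _).mp hx, hk⟩
    · rintro ⟨x, hx, hk⟩
      exact ⟨(x, (line.toList.count x : Int)),
        List.mem_map.mpr ⟨x, (PySem.Set.mem_ofList _ _).mpr hx, rfl⟩, hk⟩
  simp only [h]

-- count over a cons, in the orientation the proofs below use
lemma cnt_cons (a y : Char) (s' : List Char) :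
    (a :: s').count y = s'.count y + (if y = a then 1 else 0) := by
  by_cases h : y = a
  · subst h; simp
  · simp [h, Ne.symm h]

-- turning a run/remainder condition into a condition on the whole list
lemma cond_iff (a : Char) (s' : List Char) (k : Int) :
    ((1 + (s'.count a : Int) = k) ∨ ∃ x ∈ s', x ≠ a ∧ (s'.count x : Int) = k)
      ↔ (∃ x ∈ a :: s', ((a :: s').count x : Int) = k) := by
  constructor
  · rintro (h | ⟨x, hx, hne, hc⟩)
    · exact ⟨a, by simp, by rw [cnt_cons, if_pos rfl]; push_cast; omega⟩
    · exact ⟨x, List.mem_cons_of_mem _ hx, by rw [cnt_cons, if_neg hne]; push_cast at *; omega⟩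
  · rintro ⟨x, hx, hc⟩
    by_cases hxa : x = a
    · subst hxa
      rw [cnt_cons, if_pos rfl] at hc
      left; push_cast at hc ⊢; omega
    · rcases List.mem_cons.mp hx with rfl | hx'
      · exact absurd rfl hxa
      · rw [cnt_cons, if_neg hxa] at hc
        right; exact ⟨x, hx', hxa, by push_cast at hc ⊢; omega⟩

-- the main loop invariant of B on a sorted remainder
lemma bmain (s : List Char) (hs : s.Pairwise (· ≤ ·)) :
    ∀ (two three : Int) (c : Char) (run : Int), (∀ x ∈ s, c ≤ x) →
      bfinish (s.foldl bstep (two, three, some c, run)) =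
        ((if run + (s.count c : Int) = 2 ∨ (∃ x ∈ s, x ≠ c ∧ (s.count x : Int) = 2) then 1 else two),
         (if run + (s.count c : Int) = 3 ∨ (∃ x ∈ s, x ≠ c ∧ (s.count x : Int) = 3) then 1 else three)) := by
  induction s with
  | nil => intro two three c run _; simp [bfinish]
  | cons a s' ih =>
    intro two three c run hle
    have hs' : s'.Pairwise (· ≤ ·) := hs.tail
    have ha : ∀ x ∈ s', a ≤ x := fun x hx => List.rel_of_pairwise_cons hs hx
    by_cases hac : a = c
    · subst hac
      have hst : bstep (two, three, some a, run) a = (two, three, some a, run + 1) := by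
        simp [bstep]
      rw [List.foldl_cons, hst, ih hs' two three a (run + 1) ha]
      have hiff : ∀ k : Int,
          ((run + 1) + (s'.count a : Int) = k ∨ ∃ x ∈ s', x ≠ a ∧ (s'.count x : Int) = k)
            ↔ (run + ((a :: s').count a : Int) = k ∨
                ∃ x ∈ a :: s', x ≠ a ∧ ((a :: s').count x : Int) = k) := by
        intro k
        refine or_congr ?_ ?_
        · rw [cnt_cons, if_pos rfl]; push_cast; constructor <;> (intro; omega)
        · constructor
          · rintro ⟨x, hx, hne, hc⟩
            exact ⟨x, List.mem_cons_of_mem _ hx, hne, by rw [cnt_cons, if_neg hne]; push_cast at *; omega⟩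
          · rintro ⟨x, hx, hne, hc⟩
            rcases List.mem_cons.mp hx with rfl | hx'
            · exact absurd rfl hne
            · exact ⟨x, hx', hne, by rw [cnt_cons, if_neg hne] at hc; push_cast at *; omega⟩
      congr 1 <;> exact if_congr (hiff _) rfl rfl
    · -- a ≠ c : the run of c flushes; c does not occur in a :: s'
      have hcnot : ∀ x ∈ a :: s', x ≠ c := by
        intro x hx
        have hca : c < a := lt_of_le_of_ne (hle a List.mem_cons_self) (fun h => hac h.symm)
        rcases List.mem_cons.mp hx with rfl | hx'
        · exact fun h => hac h
        · exact fun h => absurd (h ▸ ha x hx') (not_le.mpr hca)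
      have hcc : (a :: s').count c = 0 := by
        rw [List.count_eq_zero]; intro h; exact hcnot c h rfl
      have hst : bstep (two, three, some c, run) a =
          ((if run = 2 then 1 else two), (if run = 3 then 1 else three), some a, 1) := by
        simp [bstep, Option.some.injEq, hac]
      rw [List.foldl_cons, hst, ih hs' _ _ a 1 ha, hcc]
      have hC : ∀ k : Int, (∃ x ∈ a :: s', x ≠ c ∧ ((a :: s').count x : Int) = k)
          ↔ ((1 + (s'.count a : Int) = k) ∨ ∃ x ∈ s', x ≠ a ∧ (s'.count x : Int) = k) := by
        intro k
        rw [cond_iff a s' k]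
        constructor
        · rintro ⟨x, hx, _, hc⟩; exact ⟨x, hx, hc⟩
        · rintro ⟨x, hx, hc⟩; exact ⟨x, hx, hcnot x hx, hc⟩
      congr 1 <;>
      · rw [if_flush]
        refine if_congr ?_ rfl rfl
        rw [Nat.cast_zero, add_zero]
        exact or_congr Iff.rfl (hC _).symm

-- B's whole loop from the initial state, on a sorted list
set_option maxRecDepth 4096 in
lemma bmain0 (s : List Char) (hs : s.Pairwise (· ≤ ·)) :
    bfinish (s.foldl bstep (0, 0, none, 0)) =
      ((if ∃ x ∈ s, (s.count x : Int) = 2 then 1 else 0),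
       (if ∃ x ∈ s, (s.count x : Int) = 3 then 1 else 0)) := by
  cases s with
  | nil => simp [bfinish]
  | cons a s' =>
    have ha : ∀ x ∈ s', a ≤ x := fun x hx => List.rel_of_pairwise_cons hs hx
    have hst : bstep (0, 0, none, 0) a = (0, 0, some a, 1) := by simp [bstep]
    rw [List.foldl_cons, hst, bmain s' hs.tail 0 0 a 1 ha]
    rw [Prod.mk.injEq]
    exact ⟨if_congr (cond_iff a s' _) rfl rfl, if_congr (cond_iff a s' _) rfl rfl⟩

-- ===== VERDICT (by name: the statement is the Claim_ definition above) =====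
set_option maxRecDepth 4096 in
theorem process_spec : Claim_equal_process := by
  intro line _
  unfold Spec_process process_alt
  have hperm : (PySem.List.sorted line.toList (fun x => x) false).Perm line.toList :=
    PySem.List.sorted_perm line.toList (fun x => x) false
  have hpw : (PySem.List.sorted line.toList (fun x => x) false).Pairwise (· ≤ ·) := by
    simpa using PySem.List.sorted_pairwise line.toList (fun x => x)
  rw [processA, bmain0 _ hpw]
  have hcond : ∀ k : Int, (∃ x ∈ line.toList, (line.toList.count x : Int) = k)
      ↔ (∃ x ∈ PySem.List.sorted line.toList (fun x => x) false,
           ((PySem.List.sorted line.toList (fun x => x) false).count x : Int) = k) := by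
    intro k
    constructor
    · rintro ⟨x, hx, hc⟩
      exact ⟨x, hperm.mem_iff.mpr hx, by rw [hperm.count_eq]; exact hc⟩
    · rintro ⟨x, hx, hc⟩
      exact ⟨x, hperm.mem_iff.mp hx, by rw [← hperm.count_eq]; exact hc⟩
  rw [Prod.mk.injEq]
  exact ⟨if_congr (hcond _) rfl rfl, if_congr (hcond _) rfl rfl⟩
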